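-- pv_equiv track=rewrite | github.com/elisabetj/forritun_lausnir | assignments/08plus_printer_tetris/a08p03indentation/complete_autograder_setup/submissions/accepted/solution_code.py | determine_clearance
-- ===== SOURCE A (Python) =====
-- from typing import Tuple
--
-- def determine_clearance(text: str, max_width: int) -> Tuple[int]:
--     min_clearance_left = max_width
--     min_clearance_right = max_width
--     for line in text.splitlines():
--         if not line:
--             continue
--         clearance_left = len(line) - len(line.lstrip(" "))
--         min_clearance_left = min(clearance_left, min_clearance_left)
--         clearance_right = max_width - len(line)
--         min_clearance_right = min(clearance_right, min_clearance_right)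
--
--     return min_clearance_left, min_clearance_right
-- ===== SOURCE B (Python) =====
-- def determine_clearance(text, max_width):
--     # One character-level scan: track current line's length and leading-space
--     # count directly, never materialising the lines.
--     best_left = max_width
--     best_len = 0
--     cur_len = 0
--     cur_lead = 0
--     leading = True
--     i = 0
--     n = len(text)
--     while i < n:
--         c = text[i]
--         if c == '\n' or c == '\r':
--             if cur_len:
--                 best_left = min(best_left, cur_lead)
--                 best_len = max(best_len, cur_len)
--             cur_len = 0
--             cur_lead = 0
--             leading = True
--             if c == '\r' and i + 1 < n and text[i + 1] == '\n':
--                 i += 1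
--         else:
--             cur_len += 1
--             if leading and c == ' ':
--                 cur_lead += 1
--             else:
--                 leading = False
--         i += 1
--     if cur_len:
--         best_left = min(best_left, cur_lead)
--         best_len = max(best_len, cur_len)
--     return best_left, max_width - best_len
-- ===== Notes on version B (the rewrite author's own statement) =====
-- stated objective: alternative
-- what changed: Replaces A's splitlines+lstrip passes over materialised lines by a single character-level state machine over the raw text that tracks the current line's length and leading-space count and folds the minima/maxima on the fly (right clearance via max_width - max line length).
import Mathlib
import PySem

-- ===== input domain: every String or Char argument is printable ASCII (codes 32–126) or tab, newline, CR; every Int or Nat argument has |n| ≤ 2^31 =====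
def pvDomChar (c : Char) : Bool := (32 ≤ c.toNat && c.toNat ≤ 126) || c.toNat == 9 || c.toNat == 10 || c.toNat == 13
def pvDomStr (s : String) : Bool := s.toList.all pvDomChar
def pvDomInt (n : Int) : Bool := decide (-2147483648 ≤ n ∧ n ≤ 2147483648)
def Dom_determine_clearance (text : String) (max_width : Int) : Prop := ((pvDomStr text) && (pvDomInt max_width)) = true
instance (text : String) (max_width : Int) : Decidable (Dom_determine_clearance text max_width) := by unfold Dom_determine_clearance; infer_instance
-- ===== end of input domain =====

-- B replaces A's splitlines/lstrip passes by ONE character-level state machine over the raw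
-- text (tracking the current line's length and leading-space count); same O(n), alternative
-- decomposition. No side effects.

-- ===== PORT A =====
-- exact port of `len(line) - len(line.lstrip(" "))`: lstrip(" ") drops only leading spaces
def pvLeftOf (l : String) : Int :=
  PySem.Str.len l - ((l.toList.dropWhile (fun c => c == ' ')).length : Int)

def determine_clearance (text : String) (max_width : Int) : Int × Int :=
  (PySem.Str.splitlines text).foldl
    (fun (s : Int × Int) line =>
      if line = "" then s
      else (min (pvLeftOf line) s.1, min (max_width - PySem.Str.len line) s.2))
    (max_width, max_width)

-- ===== PORT B =====
-- flush the finished line into the accumulators (Python's two `if cur_len:` blocks)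
def pvFlush (bl bL cl cd : Int) : Int × Int :=
  if cl ≠ 0 then (min bl cd, max bL cl) else (bl, bL)

-- the while-loop of Source B: state = (best_left, best_len, cur_len, cur_lead, leading);
-- the '\r' followed by '\n' lookahead (i += 1) becomes the two-char pattern
def pvScan (bl bL cl cd : Int) (lead : Bool) : List Char → Int × Int
  | [] => pvFlush bl bL cl cd
  | '\r' :: '\n' :: t =>
      pvScan (pvFlush bl bL cl cd).1 (pvFlush bl bL cl cd).2 0 0 true t
  | c :: t =>
      if c = '\n' ∨ c = '\r' then
        pvScan (pvFlush bl bL cl cd).1 (pvFlush bl bL cl cd).2 0 0 true t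
      else
        pvScan bl bL (cl + 1) (if lead && (c == ' ') then cd + 1 else cd) (lead && (c == ' ')) t

def determine_clearance_alt (text : String) (max_width : Int) : Int × Int :=
  let r := pvScan max_width 0 0 0 true text.toList
  (r.1, max_width - r.2)

-- ===== PRECONDITION & SPEC =====
def Spec_determine_clearance (text : String) (max_width : Int) (out : Int × Int) : Prop := out = determine_clearance_alt text max_width
instance (text : String) (max_width : Int) (out : Int × Int) : Decidable (Spec_determine_clearance text max_width out) := by unfold Spec_determine_clearance; infer_instance

-- ===== CLAIM (what is proved, stated in full; the proofs are below) =====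
def Claim_equal_determine_clearance : Prop := ∀ (text : String) (max_width : Int), Dom_determine_clearance text max_width → Spec_determine_clearance text max_width (determine_clearance text max_width)

-- ===== LEMMAS AND PROOFS =====

-- leading-space count and all-spaces test of a (forward) line
def pvLead (l : List Char) : Int := ((l.takeWhile (fun c => c == ' ')).length : Int)
def pvAllSp (l : List Char) : Bool := l.all (fun c => c == ' ')

-- the break predicate splitlines uses, as a named function
def pvIsB (c : Char) : Bool :=
  decide (c.toNat = 10) || decide (c.toNat = 13) || decide (c.toNat = 11) || decide (c.toNat = 12) ||
    decide (c.toNat = 28) || decide (c.toNat = 29) || decide (c.toNat = 30) || decide (c.toNat = 133) ||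
    decide (c.toNat = 8232) || decide (c.toNat = 8233)

lemma splitlines_eq_go (s : List Char) :
    PySem.Chars.splitlines s = PySem.Chars.splitlines.go pvIsB s [] [] := rfl

lemma char_of_toNat {c d : Char} (h : c.toNat = d.toNat) : c = d := by
  exact Char.ext (UInt32.toNat_inj.mp h)

-- on the domain's characters the break predicate is exactly "newline or CR"
lemma pvIsB_dom (c : Char) (h : pvDomChar c = true) :
    pvIsB c = (decide (c = '\n') || decide (c = '\r')) := by
  simp only [pvDomChar, Bool.or_eq_true, Bool.and_eq_true, decide_eq_true_eq, beq_iff_eq] at h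
  by_cases h10 : c.toNat = 10
  · have : c = '\n' := char_of_toNat h10
    subst this; decide
  by_cases h13 : c.toNat = 13
  · have : c = '\r' := char_of_toNat h13
    subst this; decide
  · have hne : c ≠ '\n' := fun hc => h10 (by subst hc; rfl)
    have hre : c ≠ '\r' := fun hc => h13 (by subst hc; rfl)
    simp only [pvIsB, hne, hre, decide_false, Bool.or_false]
    have : c.toNat ≠ 11 ∧ c.toNat ≠ 12 ∧ c.toNat ≠ 28 ∧ c.toNat ≠ 29 ∧ c.toNat ≠ 30 ∧
        c.toNat ≠ 133 ∧ c.toNat ≠ 8232 ∧ c.toNat ≠ 8233 := by omega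
    simp [h10, h13, this.1, this.2.1, this.2.2.1, this.2.2.2.1, this.2.2.2.2.1,
      this.2.2.2.2.2.1, this.2.2.2.2.2.2.1, this.2.2.2.2.2.2.2]

-- the accumulator of splitlines.go prepends its reversed contents
lemma go_acc (isB : Char → Bool) (cs cur : List Char) (acc : List (List Char)) :
    PySem.Chars.splitlines.go isB cs cur acc
      = acc.reverse ++ PySem.Chars.splitlines.go isB cs cur [] := by
  refine (PySem.Chars.splitlines.go.induct isB
    (motive := fun cs cur _ => ∀ a, PySem.Chars.splitlines.go isB cs cur a
      = a.reverse ++ PySem.Chars.splitlines.go isB cs cur []) ?_ ?_ ?_ ?_ ?_ cs cur acc) acc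
  · intro cur acc h a
    rw [PySem.Chars.splitlines.go.eq_1, PySem.Chars.splitlines.go.eq_1, if_pos h, if_pos h]
    simp
  · intro cur acc h a
    rw [PySem.Chars.splitlines.go.eq_1, PySem.Chars.splitlines.go.eq_1, if_neg h, if_neg h]
    simp
  · intro rest cur acc ih a
    rw [PySem.Chars.splitlines.go.eq_2, PySem.Chars.splitlines.go.eq_2, ih, ih (cur.reverse :: [])]
    simp
  · intro c rest cur acc hne hb ih a
    rw [PySem.Chars.splitlines.go.eq_3 _ _ _ _ _ hne, PySem.Chars.splitlines.go.eq_3 _ _ _ _ _ hne,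
      if_pos hb, if_pos hb, ih, ih (cur.reverse :: [])]
    simp
  · intro c rest cur acc hne hb ih a
    rw [PySem.Chars.splitlines.go.eq_3 _ _ _ _ _ hne, PySem.Chars.splitlines.go.eq_3 _ _ _ _ _ hne,
      if_neg hb, if_neg hb, ih]

-- facts about the per-character state updates
lemma pvLead_append_true (p : List Char) (c : Char) (h : pvAllSp p = true) :
    pvLead (p ++ [c]) = if c = ' ' then pvLead p + 1 else pvLead p := by
  unfold pvLead
  rw [List.takeWhile_append]
  have hself : List.takeWhile (fun c => c == ' ') p = p := by
    rw [List.takeWhile_eq_self_iff]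
    simpa [pvAllSp, List.all_eq_true] using h
  by_cases hc : c = ' '
  · simp [hself, hc]
  · simp [hself, hc]
lemma pvLead_append_false (p : List Char) (c : Char) (h : pvAllSp p = false) :
    pvLead (p ++ [c]) = pvLead p := by
  unfold pvLead
  rw [List.takeWhile_append]
  have : ¬ (List.takeWhile (fun c => c == ' ') p).length = p.length := by
    intro hl
    have heq := (List.takeWhile_prefix (l := p) (p := fun c => c == ' ')).eq_of_length hl
    have hall := List.takeWhile_eq_self_iff.mp heq
    rw [pvAllSp, List.all_eq_false] at h
    rcases h with ⟨x, hx, hxs⟩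
    exact absurd (hall x hx) (by simpa using hxs)
  simp [this]

-- MAIN INVARIANT: the scanner, started mid-line with the line-so-far p, computes the two
-- folds (running min of leading spaces, running max of length) over the non-empty lines
-- that splitlines.go still produces.
lemma pvScan_go (cs : List Char) (hdom : ∀ c ∈ cs, pvDomChar c = true)
    (p : List Char) (bl bL : Int) :
    pvScan bl bL (p.length : Int) (pvLead p) (pvAllSp p) cs
      = (((PySem.Chars.splitlines.go pvIsB cs p.reverse []).filter (fun l => l ≠ [])).foldl
           (fun a l => min a (pvLead l)) bl,
         ((PySem.Chars.splitlines.go pvIsB cs p.reverse []).filter (fun l => l ≠ [])).foldl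
           (fun a l => max a ((l.length : Int))) bL) := by
  refine (PySem.Chars.splitlines.go.induct pvIsB
    (motive := fun cs cur _ => (∀ c ∈ cs, pvDomChar c = true) → ∀ (p : List Char) (bl bL : Int),
      cur = p.reverse →
      pvScan bl bL (p.length : Int) (pvLead p) (pvAllSp p) cs
        = (((PySem.Chars.splitlines.go pvIsB cs cur []).filter (fun l => l ≠ [])).foldl
             (fun a l => min a (pvLead l)) bl,
           ((PySem.Chars.splitlines.go pvIsB cs cur []).filter (fun l => l ≠ [])).foldl
             (fun a l => max a ((l.length : Int))) bL))
    ?_ ?_ ?_ ?_ ?_ cs p.reverse []) hdom p bl bL rfl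
  · -- cs = [], current line empty
    intro cur acc h _ p bl bL hcur
    subst hcur
    have hp : p = [] := by simpa using h
    subst hp
    rw [pvScan.eq_1, PySem.Chars.splitlines.go.eq_1, if_pos h]
    simp [pvFlush]
  · -- cs = [], current line non-empty: final flush
    intro cur acc h _ p bl bL hcur
    subst hcur
    have hp : p ≠ [] := by simpa using h
    rw [pvScan.eq_1, PySem.Chars.splitlines.go.eq_1, if_neg h]
    simp [pvFlush, hp]
  · -- cs = '\r' :: '\n' :: rest
    intro rest cur acc ih hd p bl bL hcur
    subst hcur
    rw [pvScan.eq_2, PySem.Chars.splitlines.go.eq_2, go_acc, List.reverse_reverse]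
    have hd' : ∀ c ∈ rest, pvDomChar c = true := fun c hc => hd c (by simp [hc])
    have ihr := ih hd' [] (pvFlush bl bL (p.length : Int) (pvLead p)).1
      (pvFlush bl bL (p.length : Int) (pvLead p)).2 rfl
    simp only [List.length_nil, Nat.cast_zero, pvLead, pvAllSp, List.takeWhile_nil,
      List.all_nil] at ihr ⊢
    rw [ihr]
    simp only [List.reverse_cons, List.reverse_nil, List.nil_append, List.filter_append,
      List.foldl_append]
    by_cases hp : p = []
    · subst hp
      simp [pvFlush]
    · simp [pvFlush, hp]
  · -- cs = c :: rest, c a line break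
    intro c rest cur acc hne hb ih hd p bl bL hcur
    subst hcur
    have hcdom : pvDomChar c = true := hd c (by simp)
    have hbreak : c = '\n' ∨ c = '\r' := by
      have h2 := pvIsB_dom c hcdom
      rw [hb] at h2
      rcases (Bool.or_eq_true _ _).mp h2.symm with h1 | h1
      · exact Or.inl (of_decide_eq_true h1)
      · exact Or.inr (of_decide_eq_true h1)
    rw [pvScan.eq_3 _ _ _ _ _ _ _ hne, if_pos hbreak,
      PySem.Chars.splitlines.go.eq_3 _ _ _ _ _ hne, if_pos hb, go_acc, List.reverse_reverse]
    have hd' : ∀ c ∈ rest, pvDomChar c = true := fun c hc => hd c (by simp [hc])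
    have ihr := ih hd' [] (pvFlush bl bL (p.length : Int) (pvLead p)).1
      (pvFlush bl bL (p.length : Int) (pvLead p)).2 rfl
    simp only [List.length_nil, Nat.cast_zero, pvLead, pvAllSp, List.takeWhile_nil,
      List.all_nil] at ihr ⊢
    rw [ihr]
    simp only [List.reverse_cons, List.reverse_nil, List.nil_append, List.filter_append,
      List.foldl_append]
    by_cases hp : p = []
    · subst hp
      simp [pvFlush]
    · simp [pvFlush, hp]
  · -- cs = c :: rest, ordinary character
    intro c rest cur acc hne hb ih hd p bl bL hcur
    subst hcur
    have hcdom : pvDomChar c = true := hd c (by simp)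
    have hbf : pvIsB c = false := by revert hb; cases pvIsB c <;> simp
    have hnb : ¬ (c = '\n' ∨ c = '\r') := by
      have h2 := pvIsB_dom c hcdom
      rw [hbf] at h2
      rintro (rfl | rfl) <;> simp at h2
    rw [pvScan.eq_3 _ _ _ _ _ _ _ hne, if_neg hnb,
      PySem.Chars.splitlines.go.eq_3 _ _ _ _ _ hne, if_neg hb]
    have hd' : ∀ c ∈ rest, pvDomChar c = true := fun c hc => hd c (by simp [hc])
    have ihr := ih hd' (p ++ [c]) bl bL (by simp)
    have hlen : ((p ++ [c]).length : Int) = (p.length : Int) + 1 := by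
      simp [List.length_append]
    have hall : pvAllSp (p ++ [c]) = (pvAllSp p && (c == ' ')) := by
      simp [pvAllSp, List.all_append]
    have hlead : pvLead (p ++ [c])
        = (if (pvAllSp p && (c == ' ')) = true then pvLead p + 1 else pvLead p) := by
      by_cases hsp : pvAllSp p = true
      · rw [pvLead_append_true p c hsp, hsp]
        by_cases hc : c = ' ' <;> simp [hc]
      · rw [pvLead_append_false p c (by simpa using hsp)]
        simp [Bool.eq_false_iff.mpr hsp]
    rw [hlen, hall, hlead] at ihr
    rw [ihr]

-- A's paired fold splits into two independent folds over the filtered lines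
lemma pairFold (mw : Int) (ls : List (List Char)) : ∀ (a b : Int),
    ls.foldl
      (fun (s : Int × Int) l =>
        if l = [] then s
        else (min (pvLead l) s.1, min (mw - (l.length : Int)) s.2)) (a, b)
    = ((ls.filter (fun l => l ≠ [])).foldl (fun a l => min (pvLead l) a) a,
       (ls.filter (fun l => l ≠ [])).foldl (fun b l => min (mw - (l.length : Int)) b) b) := by
  induction ls with
  | nil => intro a b; simp
  | cons x t ih =>
    intro a b
    by_cases hx : x = []
    · subst hx
      rw [List.foldl_cons, if_pos rfl, List.filter_cons_of_neg (by decide)]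
      exact ih a b
    · rw [List.foldl_cons, if_neg hx, List.filter_cons_of_pos (by simpa using hx),
        List.foldl_cons, List.foldl_cons]
      exact ih _ _

-- the right-side accumulation is max_width minus a running max of line lengths
lemma right_fold (mw : Int) (ls : List (List Char)) : ∀ (c : Int),
    ls.foldl (fun b l => min (mw - (l.length : Int)) b) (mw - c)
      = mw - ls.foldl (fun c l => max c ((l.length : Int))) c := by
  induction ls with
  | nil => intro c; rfl
  | cons x t ih =>
    intro c
    simp only [List.foldl_cons]
    have : min (mw - (x.length : Int)) (mw - c) = mw - max c (x.length : Int) := by omega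
    rw [this, ih]

-- bridging A's string-level line tests to the char level
lemma ofList_ne_empty {l : List Char} (h : l ≠ []) : String.ofList l ≠ "" := by
  intro he
  exact h (by simpa using congrArg String.toList he)

lemma pvLeftOf_ofList (l : List Char) : pvLeftOf (String.ofList l) = pvLead l := by
  unfold pvLeftOf pvLead
  rw [PySem.Str.len_eq, String.toList_ofList]
  have h := congrArg List.length (List.takeWhile_append_dropWhile (p := fun c => c == ' ') (l := l))
  rw [List.length_append] at h
  omega

lemma min_comm_fold (f : List Char → Int) (ls : List (List Char)) : ∀ (a : Int),
    ls.foldl (fun a l => min (f l) a) a = ls.foldl (fun a l => min a (f l)) a := by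
  induction ls with
  | nil => intro a; rfl
  | cons x t ih => intro a; simp only [List.foldl_cons, min_comm (f x) a, ih]

-- ===== VERDICT (by name: the statement is the Claim_ definition above) =====
theorem determine_clearance_spec : Claim_equal_determine_clearance := by
  intro text mw hdom
  unfold Spec_determine_clearance determine_clearance determine_clearance_alt
  have hchars : ∀ c ∈ text.toList, pvDomChar c = true := by
    unfold Dom_determine_clearance pvDomStr at hdom
    rw [Bool.and_eq_true, List.all_eq_true] at hdom
    exact hdom.1
  have hmap : PySem.Str.splitlines text
      = (PySem.Chars.splitlines text.toList).map String.ofList := rfl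
  rw [hmap, List.foldl_map]
  have hfun : (fun (s : Int × Int) l => if String.ofList l = "" then s
        else (min (pvLeftOf (String.ofList l)) s.1,
              min (mw - PySem.Str.len (String.ofList l)) s.2))
      = (fun (s : Int × Int) l => if l = [] then s
        else (min (pvLead l) s.1, min (mw - (l.length : Int)) s.2)) := by
    funext s l
    by_cases hl : l = []
    · subst hl; simp
    · rw [if_neg (ofList_ne_empty hl), if_neg hl, pvLeftOf_ofList, PySem.Str.len_eq,
        String.toList_ofList]
  rw [hfun, pairFold]
  have hscan := pvScan_go text.toList hchars [] mw 0
  simp only [List.length_nil, Nat.cast_zero, List.reverse_nil] at hscan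
  have hlead0 : pvLead [] = 0 := rfl
  have hall0 : pvAllSp [] = true := rfl
  rw [hlead0, hall0] at hscan
  rw [hscan, splitlines_eq_go]
  have hright := right_fold mw
    ((PySem.Chars.splitlines.go pvIsB text.toList [] []).filter (fun l => l ≠ [])) 0
  rw [sub_zero] at hright
  rw [hright, min_comm_fold]
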